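-- pv_equiv track=rewrite | github.com/EricTanghulu/Othello | Othello/Othello Algorithm.py | diagonalSets
-- ===== SOURCE A (Python) =====
-- def diagonalSets(pos):
--     listDiag = []
--     upperLeftRow = pos // 8 - pos % 8
--     upperLeftBound = max(0, upperLeftRow * 8)
--     upperleft = [i for i in range(pos - 9, upperLeftBound - 1, -9)]
--
--     lowerLeftRow = pos // 8 + pos % 8
--     lowerLeftBound = min(63, lowerLeftRow * 8)
--     lowerleft = [i for i in range(pos + 7, lowerLeftBound + 1, 7)]
--
--     upperRightRow = pos // 8 - (7 - pos) % 8
--     upperRightBound = max(0, upperRightRow * 8)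
--     upperright = [i for i in range(pos - 7, upperRightBound, -7)]
--
--     lowerRightRow = pos // 8 + (7 - pos) % 8
--     lowerRightBound = min(63, lowerRightRow * 8 + 9)
--     lowerright = [i for i in range(pos + 9, lowerRightBound + 1, 9)]
--
--     if upperleft:
--         listDiag.append(upperleft)
--     if lowerleft:
--         listDiag.append(lowerleft)
--     if upperright:
--         listDiag.append(upperright)
--     if lowerright:
--         listDiag.append(lowerright)
--     return listDiag
-- ===== SOURCE B (Python) =====
-- def _walkDiag(pos, col, step, dc):
--     # step along one diagonal direction from the first neighbour, collecting
--     # indices while the column stays on the board and the index stays within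
--     # the direction's board edge (>= 0 walking up, <= 63 walking down)
--     diag = []
--     i, c = pos + step, col + dc
--     while 0 <= c <= 7 and (i >= 0 if step < 0 else i <= 63):
--         diag.append(i)
--         i += step
--         c += dc
--     return diag
--
--
-- def diagonalSets(pos):
--     col = pos % 8
--     result = []
--     for step, dc in ((-9, -1), (7, -1), (-7, 1), (9, 1)):
--         diag = _walkDiag(pos, col, step, dc)
--         if diag:
--             result.append(diag)
--     return result
-- ===== Notes on version B (the rewrite author's own statement) =====
-- stated objective: alternative
-- what changed: Replaces the per-diagonal closed-form bound arithmetic plus range() comprehensions by a single boundary-checked step-by-step walk (column and edge test per step) shared by all four diagonal directions.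
import Mathlib
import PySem

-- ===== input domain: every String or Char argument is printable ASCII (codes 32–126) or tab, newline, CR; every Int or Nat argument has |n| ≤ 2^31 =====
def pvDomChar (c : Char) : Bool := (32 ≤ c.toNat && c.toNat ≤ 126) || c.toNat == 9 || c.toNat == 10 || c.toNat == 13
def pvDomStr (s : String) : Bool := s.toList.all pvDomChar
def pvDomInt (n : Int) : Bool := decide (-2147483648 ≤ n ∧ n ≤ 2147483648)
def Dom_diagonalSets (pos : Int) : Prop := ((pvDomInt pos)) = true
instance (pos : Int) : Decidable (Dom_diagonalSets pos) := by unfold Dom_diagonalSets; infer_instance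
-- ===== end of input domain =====

-- B replaces A's closed-form range-bound arithmetic by a per-step boundary-checked
-- diagonal walk (alternative decomposition, same cost); proved equal on all of Dom.


-- ===== PORT A =====
def diagonalSets (pos : Int) : List (List Int) :=
  let listDiag : List (List Int) := []
  let upperLeftRow := PySem.Int.floordiv pos 8 - PySem.Int.mod pos 8
  let upperLeftBound := max 0 (upperLeftRow * 8)
  let upperleft := (PySem.List.pyRange (pos - 9) (upperLeftBound - 1) (-9)).map (fun i => i)
  let lowerLeftRow := PySem.Int.floordiv pos 8 + PySem.Int.mod pos 8
  let lowerLeftBound := min 63 (lowerLeftRow * 8)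
  let lowerleft := (PySem.List.pyRange (pos + 7) (lowerLeftBound + 1) 7).map (fun i => i)
  let upperRightRow := PySem.Int.floordiv pos 8 - PySem.Int.mod (7 - pos) 8
  let upperRightBound := max 0 (upperRightRow * 8)
  let upperright := (PySem.List.pyRange (pos - 7) upperRightBound (-7)).map (fun i => i)
  let lowerRightRow := PySem.Int.floordiv pos 8 + PySem.Int.mod (7 - pos) 8
  let lowerRightBound := min 63 (lowerRightRow * 8 + 9)
  let lowerright := (PySem.List.pyRange (pos + 9) (lowerRightBound + 1) 9).map (fun i => i)
  let listDiag := if upperleft ≠ [] then listDiag ++ [upperleft] else listDiag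
  let listDiag := if lowerleft ≠ [] then listDiag ++ [lowerleft] else listDiag
  let listDiag := if upperright ≠ [] then listDiag ++ [upperright] else listDiag
  let listDiag := if lowerright ≠ [] then listDiag ++ [lowerright] else listDiag
  listDiag

-- ===== PORT B =====
-- one step-test of B's while condition: column on the board, index inside the edge
def pvCond (stp i c : Int) : Bool :=
  decide (0 ≤ c) && decide (c ≤ 7) && (if stp < 0 then decide (0 ≤ i) else decide (i ≤ 63))

-- B's while loop; the column moves by ±1 inside 0..7, so 8 fuel is never exhausted
def pvWalk (stp dc : Int) (i c : Int) : Nat → List Int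
  | 0 => []
  | fuel + 1 =>
    if pvCond stp i c then i :: pvWalk stp dc (i + stp) (c + dc) fuel else []

def diagonalSets_alt (pos : Int) : List (List Int) :=
  let col := PySem.Int.mod pos 8
  [((-9 : Int), (-1 : Int)), (7, -1), (-7, 1), (9, 1)].foldl
    (fun acc sd =>
      let diag := pvWalk sd.1 sd.2 (pos + sd.1) (col + sd.2) 8
      if diag ≠ [] then acc ++ [diag] else acc) []

-- ===== PRECONDITION & SPEC =====
def Spec_diagonalSets (pos : Int) (out : List (List Int)) : Prop := out = diagonalSets_alt pos
instance (pos : Int) (out : List (List Int)) : Decidable (Spec_diagonalSets pos out) := by unfold Spec_diagonalSets; infer_instance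

-- ===== CLAIM (what is proved, stated in full; the proofs are below) =====
def Claim_equal_diagonalSets : Prop := ∀ (pos : Int), Dom_diagonalSets pos → Spec_diagonalSets pos (diagonalSets pos)

-- ===== LEMMAS AND PROOFS =====

-- countdown pyRange unfolded for a literal negative step
lemma pyRange_of_neg (a b s : Int) (hs : s < 0) :
    PySem.List.pyRange a b s =
      (List.range (if b < a then ((a - b + -s - 1) / -s).toNat else 0)).map
        (fun k : Nat => a + s * (k : Int)) := by
  unfold PySem.List.pyRange
  rw [if_neg (by omega), if_neg (by omega)]

-- a walk whose condition holds for the first n steps and fails at step n is a range-map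
lemma pvWalk_eq (stp dc i c : Int) (fuel n : Nat)
    (hn : n ≤ fuel)
    (hall : ∀ k : Nat, k < n → pvCond stp (i + stp * k) (c + dc * k) = true)
    (hstop : n < fuel → pvCond stp (i + stp * n) (c + dc * n) = false) :
    pvWalk stp dc i c fuel = (List.range n).map (fun k : Nat => i + stp * (k : Int)) := by
  induction fuel generalizing i c n with
  | zero =>
    have : n = 0 := by omega
    simp [pvWalk, this]
  | succ f ih =>
    cases n with
    | zero =>
      have h0 := hstop (by omega)
      simp only [Nat.cast_zero, mul_zero, add_zero] at h0
      simp [pvWalk, h0]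
    | succ n' =>
      have h0 := hall 0 (by omega)
      simp only [Nat.cast_zero, mul_zero, add_zero] at h0
      rw [List.range_succ_eq_map, List.map_cons, List.map_map]
      simp only [pvWalk, h0, if_true, Nat.cast_zero, mul_zero, add_zero]
      refine List.cons_eq_cons.mpr ⟨rfl, ?_⟩
      have hall' : ∀ k : Nat, k < n' →
          pvCond stp (i + stp + stp * k) (c + dc + dc * k) = true := by
        intro k hk
        have harg1 : i + stp + stp * (k : Int) = i + stp * ((k : Nat) + 1 : Nat) := by
          push_cast; ring
        have harg2 : c + dc + dc * (k : Int) = c + dc * ((k : Nat) + 1 : Nat) := by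
          push_cast; ring
        rw [harg1, harg2]
        exact hall (k + 1) (by omega)
      have hstop' : n' < f →
          pvCond stp (i + stp + stp * n') (c + dc + dc * n') = false := by
        intro hlt
        have harg1 : i + stp + stp * (n' : Int) = i + stp * ((n' : Nat) + 1 : Nat) := by
          push_cast; ring
        have harg2 : c + dc + dc * (n' : Int) = c + dc * ((n' : Nat) + 1 : Nat) := by
          push_cast; ring
        rw [harg1, harg2]
        exact hstop (by omega)
      rw [ih (i + stp) (c + dc) n' (by omega) hall' hstop']
      refine List.map_congr_left fun k _ => ?_
      simp only [Function.comp_apply]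
      push_cast
      ring

lemma walk_ul (pos : Int) :
    pvWalk (-9) (-1) (pos + -9) (pos % 8 + -1) 8 =
      PySem.List.pyRange (pos - 9) (max 0 ((pos / 8 - pos % 8) * 8) - 1) (-9) := by
  rw [pyRange_of_neg _ _ _ (by norm_num), show pos - 9 = pos + -9 by ring]
  simp only [neg_neg]
  apply pvWalk_eq
  · split_ifs <;> omega
  · intro k hk
    simp only [pvCond, if_pos (by norm_num : (-9 : Int) < 0), Bool.and_eq_true,
      decide_eq_true_eq]
    split_ifs at hk <;> omega
  · intro hlt
    simp only [pvCond, if_pos (by norm_num : (-9 : Int) < 0), Bool.and_eq_false_iff,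
      decide_eq_false_iff_not]
    split_ifs <;> omega

lemma walk_ll (pos : Int) :
    pvWalk 7 (-1) (pos + 7) (pos % 8 + -1) 8 =
      PySem.List.pyRange (pos + 7) (min 63 ((pos / 8 + pos % 8) * 8) + 1) 7 := by
  rw [PySem.List.pyRange_of_pos _ _ (by norm_num)]
  apply pvWalk_eq
  · split_ifs <;> omega
  · intro k hk
    simp only [pvCond, if_neg (by norm_num : ¬ (7 : Int) < 0), Bool.and_eq_true,
      decide_eq_true_eq]
    split_ifs at hk <;> omega
  · intro hlt
    simp only [pvCond, if_neg (by norm_num : ¬ (7 : Int) < 0), Bool.and_eq_false_iff,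
      decide_eq_false_iff_not]
    split_ifs <;> omega

lemma walk_ur (pos : Int) :
    pvWalk (-7) 1 (pos + -7) (pos % 8 + 1) 8 =
      PySem.List.pyRange (pos - 7) (max 0 ((pos / 8 - (7 - pos) % 8) * 8)) (-7) := by
  rw [pyRange_of_neg _ _ _ (by norm_num), show pos - 7 = pos + -7 by ring]
  simp only [neg_neg]
  apply pvWalk_eq
  · split_ifs <;> omega
  · intro k hk
    simp only [pvCond, if_pos (by norm_num : (-7 : Int) < 0), Bool.and_eq_true,
      decide_eq_true_eq]
    split_ifs at hk <;> omega
  · intro hlt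
    simp only [pvCond, if_pos (by norm_num : (-7 : Int) < 0), Bool.and_eq_false_iff,
      decide_eq_false_iff_not]
    split_ifs <;> omega

lemma walk_lr (pos : Int) :
    pvWalk 9 1 (pos + 9) (pos % 8 + 1) 8 =
      PySem.List.pyRange (pos + 9) (min 63 ((pos / 8 + (7 - pos) % 8) * 8 + 9) + 1) 9 := by
  rw [PySem.List.pyRange_of_pos _ _ (by norm_num)]
  apply pvWalk_eq
  · split_ifs <;> omega
  · intro k hk
    simp only [pvCond, if_neg (by norm_num : ¬ (9 : Int) < 0), Bool.and_eq_true,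
      decide_eq_true_eq]
    split_ifs at hk <;> omega
  · intro hlt
    simp only [pvCond, if_neg (by norm_num : ¬ (9 : Int) < 0), Bool.and_eq_false_iff,
      decide_eq_false_iff_not]
    split_ifs <;> omega

-- ===== VERDICT (by name: the statement is the Claim_ definition above) =====
theorem diagonalSets_spec : Claim_equal_diagonalSets := by
  intro pos _
  unfold Spec_diagonalSets diagonalSets diagonalSets_alt
  rw [PySem.Int.floordiv_eq_ediv_of_pos (by norm_num),
      PySem.Int.mod_eq_emod_of_pos (a := pos) (by norm_num),
      PySem.Int.mod_eq_emod_of_pos (a := 7 - pos) (by norm_num)]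
  simp only [List.foldl, List.map_id']
  rw [walk_ul, walk_ll, walk_ur, walk_lr]
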